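-- pv_equiv track=rewrite | github.com/pshankinclarke/LudingtonLabColonyCounter | AS-7_3/programsP/getBlobLoc.py | SAE
-- ===== SOURCE A (Python) =====
-- def SAE(width,height):
--    widthIterator = 12
--    heightIterator = 8
--    Hstep= int(height/heightIterator)
--    Wstep = int(width/widthIterator)
--    Slist,Elist,combList = ([] for i in range(3))
--
--    for y in range(0,(height-Hstep)+1,Hstep):
--       for x in range(0,(width-Wstep)+1,Wstep):
--          Slist = Slist + [(x,y)]
--    for y in range(Hstep,(height)+1,Hstep):
--       for x in range(Wstep,(width)+1,Wstep):
--          Elist = Elist + [(x,y)]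
--    for pos in range(0,len(Slist)):
--       combList = combList + [(Slist[pos],Elist[pos])]
--    return combList
-- ===== SOURCE B (Python) =====
-- def SAE(width, height):
--     Hstep = int(height/8)
--     Wstep = int(width/12)
--     return [((x, y), (x + Wstep, y + Hstep))
--             for y in range(0, (height - Hstep) + 1, Hstep)
--             for x in range(0, (width - Wstep) + 1, Wstep)]
-- ===== Notes on version B (the rewrite author's own statement) =====
-- stated objective: simpler
-- what changed: Replaces A's three passes (build Slist of start corners, build Elist of end corners, then an index loop pairing Slist[pos] with Elist[pos]) by one nested comprehension that emits each ((x,y),(x+Wstep,y+Hstep)) rectangle directly, dropping both intermediate lists and the combining loop.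
import Mathlib
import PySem

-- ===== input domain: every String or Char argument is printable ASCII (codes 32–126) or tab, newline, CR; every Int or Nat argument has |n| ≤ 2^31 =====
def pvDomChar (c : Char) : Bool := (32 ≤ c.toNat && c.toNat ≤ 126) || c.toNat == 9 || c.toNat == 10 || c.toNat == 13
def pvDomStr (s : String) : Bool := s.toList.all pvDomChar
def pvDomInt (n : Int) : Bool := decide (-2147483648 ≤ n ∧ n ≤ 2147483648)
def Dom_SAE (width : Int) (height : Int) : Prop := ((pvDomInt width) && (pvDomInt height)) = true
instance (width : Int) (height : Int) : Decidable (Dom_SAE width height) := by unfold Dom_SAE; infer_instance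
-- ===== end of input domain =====

-- B replaces A's three passes (start-corner list, end-corner list, index-pairing loop)
-- by one nested comprehension emitting each rectangle directly: a simpler decomposition.


-- ===== PORT A =====
-- int(height/8): exact float true division for |height| ≤ 2^31, then truncation toward zero = Int.tdiv
def SAE (width : Int) (height : Int) : List ((Int × Int) × (Int × Int)) :=
  let Hstep : Int := height.tdiv 8
  let Wstep : Int := width.tdiv 12
  let Slist : List (Int × Int) :=
    (PySem.List.pyRange 0 ((height - Hstep) + 1) Hstep).foldl (fun acc y =>
      (PySem.List.pyRange 0 ((width - Wstep) + 1) Wstep).foldl (fun acc2 x =>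
        acc2 ++ [(x, y)]) acc) []
  let Elist : List (Int × Int) :=
    (PySem.List.pyRange Hstep (height + 1) Hstep).foldl (fun acc y =>
      (PySem.List.pyRange Wstep (width + 1) Wstep).foldl (fun acc2 x =>
        acc2 ++ [(x, y)]) acc) []
  -- Slist[pos] / Elist[pos]: in-range on every input A returns on (lists have equal length),
  -- so the default of pyGetD is never used
  (PySem.List.pyRange 0 (Slist.length : Int) 1).foldl (fun acc pos =>
    acc ++ [(PySem.List.pyGetD Slist pos (0, 0), PySem.List.pyGetD Elist pos (0, 0))]) []

-- ===== PORT B =====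
def SAE_alt (width : Int) (height : Int) : List ((Int × Int) × (Int × Int)) :=
  let Hstep : Int := height.tdiv 8
  let Wstep : Int := width.tdiv 12
  (PySem.List.pyRange 0 ((height - Hstep) + 1) Hstep).flatMap (fun y =>
    (PySem.List.pyRange 0 ((width - Wstep) + 1) Wstep).map (fun x =>
      ((x, y), (x + Wstep, y + Hstep))))

-- ===== PRECONDITION & SPEC =====
-- Pre_ excludes exactly the inputs where int(height/8) or int(width/12) is 0: there both
-- programs' range() raises ValueError ("arg 3 must not be zero").
def Pre_SAE (width : Int) (height : Int) : Prop :=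
  (height ≤ -8 ∨ 8 ≤ height) ∧ (width ≤ -12 ∨ 12 ≤ width)
instance (width : Int) (height : Int) : Decidable (Pre_SAE width height) := by unfold Pre_SAE; infer_instance
def pvWitness_SAE : Int × Int := (24, 16)
def Spec_SAE (width : Int) (height : Int) (out : List ((Int × Int) × (Int × Int))) : Prop := out = SAE_alt width height
instance (width : Int) (height : Int) (out : List ((Int × Int) × (Int × Int))) : Decidable (Spec_SAE width height out) := by unfold Spec_SAE; infer_instance

-- ===== CLAIM (what is proved, stated in full; the proofs are below) =====
def Claim_equal_SAE : Prop := ∀ (width : Int) (height : Int), Dom_SAE width height → Pre_SAE width height → Spec_SAE width height (SAE width height)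

-- ===== LEMMAS AND PROOFS =====

-- range(s, d+1, s) is range(0, (d-s)+1, s) shifted by s (same count in every case)
theorem pyRange_shift (d s : Int) :
    PySem.List.pyRange s (d + 1) s = (PySem.List.pyRange 0 ((d - s) + 1) s).map (· + s) := by
  unfold PySem.List.pyRange
  by_cases hs : s = 0
  · simp [hs]
  · simp only [if_neg hs, List.map_map]
    by_cases hp : 0 < s
    · simp only [if_pos hp]
      have hcount : (if s < d + 1 then ((d + 1 - s + s - 1) / s).toNat else 0)
          = (if (0:Int) < d - s + 1 then ((d - s + 1 - 0 + s - 1) / s).toNat else 0) := by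
        have h1 : d + 1 - s + s - 1 = d := by ring
        have h2 : d - s + 1 - 0 + s - 1 = d := by ring
        rw [h1, h2]
        by_cases hlt : s < d + 1
        · rw [if_pos hlt, if_pos (by omega)]
        · rw [if_neg hlt, if_neg (by omega)]
      rw [hcount]
      apply List.map_congr_left
      intro k _
      simp; ring
    · simp only [if_neg hp]
      have hcount : (if d + 1 < s then ((s - (d + 1) + -s - 1) / -s).toNat else 0)
          = (if d - s + 1 < 0 then ((0 - (d - s + 1) + -s - 1) / -s).toNat else 0) := by
        have h1 : s - (d + 1) + -s - 1 = -d - 2 := by ring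
        have h2 : (0:Int) - (d - s + 1) + -s - 1 = -d - 2 := by ring
        rw [h1, h2]
        by_cases hlt : d + 1 < s
        · rw [if_pos hlt, if_pos (by omega)]
        · rw [if_neg hlt, if_neg (by omega)]
      rw [hcount]
      apply List.map_congr_left
      intro k _
      simp; ring

-- pairing S[pos] with (S.map f)[pos] over range(len(S)) is S.map (fun p => (p, f p))
theorem pair_with_map {α β : Type} [Inhabited α] [Inhabited β] (S : List α) (f : α → β) (d : α) (e : β) :
    (PySem.List.pyRange 0 (S.length : Int) 1).map
      (fun pos => (PySem.List.pyGetD S pos d, PySem.List.pyGetD (S.map f) pos e))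
    = S.map (fun p => (p, f p)) := by
  rw [PySem.List.pyRange_zero_natCast]
  rw [List.map_map]
  apply List.ext_getElem
  · simp
  · intro k h1 h2
    simp only [List.getElem_map, List.getElem_range, Function.comp_apply]
    have hk : k < S.length := by simpa using h2
    rw [PySem.List.pyGetD_natCast, PySem.List.pyGetD_natCast] <;> simp [hk]

theorem SAE_eq_alt (width height : Int) : SAE width height = SAE_alt width height := by
  unfold SAE SAE_alt
  simp only [PySem.List.foldl_append_singleton_eq_map, PySem.List.foldl_append_eq_flatMap,
    List.nil_append, pyRange_shift]
  rw [List.flatMap_map]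
  have hE : ∀ (Ws Hs : Int) (Ry Rx : List Int),
      (Ry.flatMap fun y => (Rx.map (· + Ws)).map fun x => ((x : Int), y + Hs))
      = (Ry.flatMap fun y => Rx.map fun x => (x, y)).map
          (fun p => (p.1 + Ws, p.2 + Hs)) := by
    intro Ws Hs Ry Rx
    rw [List.map_flatMap]
    apply List.flatMap_congr
    intro y _
    simp [List.map_map]
  rw [hE]
  rw [pair_with_map _ (fun p => (p.1 + (width.tdiv 12), p.2 + (height.tdiv 8))) (0,0) (0,0)]
  rw [List.map_flatMap]
  apply List.flatMap_congr
  intro y _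
  simp [List.map_map]

-- ===== VERDICT (by name: the statement is the Claim_ definition above) =====
theorem SAE_spec : Claim_equal_SAE := by
  intro width height _ _
  unfold Spec_SAE
  exact SAE_eq_alt width height
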